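-- pv_equiv track=rewrite | github.com/AadiBhumihar/Algorithm | valid_substr.py | valid_sudstr
-- ===== SOURCE A (Python) =====
-- def valid_sudstr(str1) :
--
--     str_len = len(str1);
--     str_list = [0 for i in range(str_len)] ;
--     for i in range(str_len) :
--         strs = str1[:i] ;
--         strs_len = len(strs)
--         if ((i==0) and ((str1[i]=='a') or (str1[i]=='z'))) :
--             str_list[i] = 1;
--         elif ((str1[i]=='a') or (str1[i]=='z')) :
--             str_list[i] =  strs_len + str_list[i-1]+ 1 ;
--         elif((str1[i]!='a') and (str1[i]!='z')) :
--             if (str_list[i-1]==0) :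
--                 str_list[i] = str_list[i-1];
--             else :
--                 rstr = list(reversed(strs));
--
--                 rstr_a = strs_len
--                 rstr_z = strs_len
--                 if 'a' in rstr:
--                     rstr_a = rstr.index('a');
--                 if 'z' in rstr :
--                     rstr_z = rstr.index('z');
--                 if ((strs_len-1-rstr_a) > (strs_len-1-rstr_z)):
--                      str_list[i] = str_list[i-1] + (strs_len-1-rstr_a) +1;
--                 else :
--                     str_list[i] = str_list[i-1] + (strs_len-1-rstr_z) +1;
--
--     return str_list[-1]
-- ===== SOURCE B (Python) =====
-- def valid_sudstr(str1):
--     # One pass: track the index of the most recent 'a' or 'z'; every substring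
--     # ending at i that starts at or before that index is valid, i.e. last+1 of them.
--     total = 0
--     last = -1
--     for i, c in enumerate(str1):
--         if c == 'a' or c == 'z':
--             last = i
--         total += last + 1
--     return total
-- ===== Notes on version B (the rewrite author's own statement) =====
-- stated objective: faster
-- what changed: Replaced the O(n^2) prefix DP (which re-slices the prefix and rescans the reversed prefix with list.index to find the nearest prior 'a'/'z') by a single left-to-right pass that maintains the last index of 'a'/'z' and accumulates last+1 per position.
import Mathlib
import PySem

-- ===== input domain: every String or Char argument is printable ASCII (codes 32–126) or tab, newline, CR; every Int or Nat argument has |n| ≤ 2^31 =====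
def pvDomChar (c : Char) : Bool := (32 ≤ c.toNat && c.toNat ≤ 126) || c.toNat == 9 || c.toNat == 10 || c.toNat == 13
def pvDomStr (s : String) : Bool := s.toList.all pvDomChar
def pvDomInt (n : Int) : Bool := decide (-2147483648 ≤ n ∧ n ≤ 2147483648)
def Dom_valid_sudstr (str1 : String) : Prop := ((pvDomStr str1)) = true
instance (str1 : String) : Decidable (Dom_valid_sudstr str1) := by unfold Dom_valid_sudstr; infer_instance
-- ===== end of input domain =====

-- B replaces A's O(n^2) prefix DP (reversed-prefix .index scans) by a single pass
-- tracking the last index of 'a'/'z'; equivalence of the RETURN value is proved on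
-- non-empty strings (A raises IndexError on "").

-- ===== PORT A =====
-- loop body of A: one iteration of `for i in range(str_len)` mutating str_list
def validStep (cs : List Char) (sl : List Int) (i : Int) : List Int :=
  let strs := PySem.List.slice cs none (some i)        -- strs = str1[:i]
  let strs_len : Int := strs.length
  let c := PySem.List.pyGetD cs i ' '                  -- str1[i] (i is always in range)
  if i = 0 ∧ (c = 'a' ∨ c = 'z') then
    sl.set i.toNat 1                                   -- str_list[i] = 1
  else if c = 'a' ∨ c = 'z' then
    sl.set i.toNat (strs_len + PySem.List.pyGetD sl (i - 1) 0 + 1)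
  else  -- Python's final elif condition is exhaustive here
    if PySem.List.pyGetD sl (i - 1) 0 = 0 then
      sl.set i.toNat (PySem.List.pyGetD sl (i - 1) 0)
    else
      let rstr := strs.reverse
      let rstr_a : Int := if rstr.contains 'a'
        then ((PySem.List.index? rstr 'a').getD 0 : Nat) else strs_len
      let rstr_z : Int := if rstr.contains 'z'
        then ((PySem.List.index? rstr 'z').getD 0 : Nat) else strs_len
      if strs_len - 1 - rstr_a > strs_len - 1 - rstr_z then
        sl.set i.toNat (PySem.List.pyGetD sl (i - 1) 0 + (strs_len - 1 - rstr_a) + 1)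
      else
        sl.set i.toNat (PySem.List.pyGetD sl (i - 1) 0 + (strs_len - 1 - rstr_z) + 1)

def valid_sudstr (str1 : String) : Int :=
  let cs := str1.toList
  let str_len : Int := cs.length
  let str_list := (PySem.List.pyRange 0 str_len 1).map (fun _ => (0 : Int))
  let sl := (PySem.List.pyRange 0 str_len 1).foldl (validStep cs) str_list
  (PySem.List.pyGet? sl (-1)).getD 0   -- str_list[-1]; none = IndexError, excluded by Pre_

-- ===== PORT B =====
def valid_sudstr_alt (str1 : String) : Int :=
  -- for i, c in enumerate(str1): if c in 'az': last = i; total += last + 1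
  (str1.toList.zipIdx.foldl
    (fun (st : Int × Int) (p : Char × Nat) =>
      let last := if p.1 = 'a' ∨ p.1 = 'z' then (p.2 : Int) else st.2
      (st.1 + last + 1, last)) (0, -1)).1

-- ===== PRECONDITION & SPEC =====
-- Pre_ excludes only the empty string, on which A raises IndexError (str_list[-1] of []).
def Pre_valid_sudstr (str1 : String) : Prop := str1 ≠ ""
instance (str1 : String) : Decidable (Pre_valid_sudstr str1) := by
  unfold Pre_valid_sudstr; infer_instance
def pvWitness_valid_sudstr : String := "az"

def Spec_valid_sudstr (str1 : String) (out : Int) : Prop := out = valid_sudstr_alt str1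
instance (str1 : String) (out : Int) : Decidable (Spec_valid_sudstr str1 out) := by
  unfold Spec_valid_sudstr; infer_instance

-- ===== CLAIM (what is proved, stated in full; the proofs are below) =====
def Claim_equal_valid_sudstr : Prop := ∀ (str1 : String), Dom_valid_sudstr str1 →
  Pre_valid_sudstr str1 → Spec_valid_sudstr str1 (valid_sudstr str1)

-- ===== LEMMAS AND PROOFS =====

-- index (from the right end) of the last 'a'/'z' in a list given REVERSED; -1 if none
def revLast : List Char → Int
  | [] => -1
  | c :: r => if c = 'a' ∨ c = 'z' then (r.length : Int) else revLast r

-- same, for a single target character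
def revLastC : List Char → Char → Int
  | [], _ => -1
  | x :: r, c => if x = c then (r.length : Int) else revLastC r c

def lastAZ (p : List Char) : Int := revLast p.reverse

-- the count of valid substrings of p, computed on p.reverse
def cntRev : List Char → Int
  | [] => 0
  | c :: r => cntRev r + revLast (c :: r) + 1

def cnt (p : List Char) : Int := cntRev p.reverse

lemma pyGet_neg_one {α : Type} (l : List α) (hn : 0 < l.length) :
    PySem.List.pyGet? l (-1) = some (l[l.length - 1]'(by omega)) := by
  simp only [PySem.List.pyGet?, PySem.List.pyIdx?]
  rw [if_neg (by omega : ¬ (0:Int) ≤ -1), if_pos (show -(l.length:Int) ≤ -1 by omega)]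
  rw [show ((-(-1:Int)).toNat) = 1 from rfl]
  simp only [Option.bind_some]
  rw [List.getElem?_eq_getElem (show l.length - 1 < l.length by omega)]

lemma lastAZ_snoc (p : List Char) (c : Char) :
    lastAZ (p ++ [c]) = if c = 'a' ∨ c = 'z' then (p.length : Int) else lastAZ p := by
  simp [lastAZ, revLast]

lemma cnt_snoc (p : List Char) (c : Char) :
    cnt (p ++ [c]) = cnt p + lastAZ (p ++ [c]) + 1 := by
  simp [cnt, lastAZ, cntRev]

lemma revLast_ge (q : List Char) : -1 ≤ revLast q := by
  induction q with
  | nil => simp [revLast]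
  | cons x r _ => simp only [revLast]; split <;> omega

lemma cntRev_nonneg_zero (q : List Char) :
    0 ≤ cntRev q ∧ (cntRev q = 0 → revLast q = -1) := by
  induction q with
  | nil => simp [cntRev, revLast]
  | cons x r ih =>
    have h1 := revLast_ge (x :: r)
    simp only [cntRev]
    constructor
    · omega
    · intro h; omega

lemma revLastC_lt (q : List Char) (c : Char) : revLastC q c < (q.length : Int) := by
  induction q with
  | nil => simp [revLastC]
  | cons x r ih =>
    simp only [revLastC, List.length_cons]
    split <;> omega

lemma revLast_eq_max (q : List Char) :
    revLast q = max (revLastC q 'a') (revLastC q 'z') := by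
  induction q with
  | nil => simp [revLast, revLastC]
  | cons x r ih =>
    have ha := revLastC_lt r 'a'
    have hz := revLastC_lt r 'z'
    simp only [revLast, revLastC]
    by_cases h1 : x = 'a'
    · simp [h1]; omega
    · by_cases h2 : x = 'z'
      · simp [h2]
        omega
      · simp [h1, h2, ih]

-- A's reversed-prefix index computation equals revLastC
lemma index_revLastC (q : List Char) (c : Char) :
    (q.length : Int) - 1 -
      (if q.contains c then (((PySem.List.index? q c).getD 0 : Nat) : Int) else (q.length : Int))
    = revLastC q c := by
  simp only [PySem.List.index?]
  induction q with
  | nil => simp [revLastC]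
  | cons x r ih =>
    by_cases h : x = c
    · subst h
      simp [List.idxOf?_cons, revLastC]
    · have hx : (x == c) = false := by simp [h]
      have hcont : (x :: r).contains c = r.contains c := by
        rw [List.contains_cons, beq_false_of_ne (fun hcx => h hcx.symm), Bool.false_or]
      rw [hcont]
      simp only [List.idxOf?_cons, hx, Bool.false_eq_true, if_false, List.length_cons,
        revLastC, h]
      by_cases hm : r.contains c = true
      · cases ho : List.idxOf? c r with
        | none => exact absurd (List.idxOf?_eq_none_iff.mp ho) (by simpa using hm)
        | some k =>
          rw [ho] at ih
          simp only [hm, if_true, Option.map_some, Option.getD_some] at ih ⊢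
          rw [← ih]
          push_cast
          ring
      · have hm' : r.contains c = false := by simpa using hm
        simp only [hm', Bool.false_eq_true, if_false] at ih ⊢
        rw [← ih]
        push_cast
        ring

-- ---- B equals cnt ----
lemma b_fold (q p : List Char) :
    (q.zipIdx p.length).foldl
      (fun (st : Int × Int) (pr : Char × Nat) =>
        let last := if pr.1 = 'a' ∨ pr.1 = 'z' then (pr.2 : Int) else st.2
        (st.1 + last + 1, last)) (cnt p, lastAZ p)
    = (cnt (p ++ q), lastAZ (p ++ q)) := by
  induction q generalizing p with
  | nil => simp
  | cons c q' ih =>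
    rw [List.zipIdx_cons, List.foldl_cons]
    have hl : (if c = 'a' ∨ c = 'z' then ((p.length : Nat) : Int) else lastAZ p)
        = lastAZ (p ++ [c]) := by rw [lastAZ_snoc]
    have hstep : (let last := if (c, p.length).1 = 'a' ∨ (c, p.length).1 = 'z'
          then ((c, p.length).2 : Int) else (cnt p, lastAZ p).2
        ((cnt p, lastAZ p).1 + last + 1, last))
        = (cnt (p ++ [c]), lastAZ (p ++ [c])) := by
      show ((cnt p) + (if c = 'a' ∨ c = 'z' then ((p.length : Nat) : Int) else lastAZ p) + 1,
        if c = 'a' ∨ c = 'z' then ((p.length : Nat) : Int) else lastAZ p) = _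
      rw [hl, ← cnt_snoc]
    rw [hstep]
    have := ih (p ++ [c])
    simp only [List.length_append, List.length_singleton, List.append_assoc,
      List.singleton_append] at this
    exact this

lemma alt_eq_cnt (str1 : String) : valid_sudstr_alt str1 = cnt str1.toList := by
  unfold valid_sudstr_alt
  have h := b_fold str1.toList []
  simp only [List.length_nil, List.nil_append] at h
  rw [show cnt [] = 0 from rfl, show lastAZ [] = -1 from rfl] at h
  rw [h]

-- ---- A equals cnt ----

-- the table after k iterations of A's loop
def tbl (cs : List Char) (k : Nat) : List Int :=
  (List.range cs.length).map (fun j => if j < k then cnt (cs.take (j + 1)) else 0)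

lemma tbl_length (cs : List Char) (k : Nat) : (tbl cs k).length = cs.length := by
  simp [tbl]

lemma tbl_get (cs : List Char) (k j : Nat) (hj : j < cs.length) :
    (tbl cs k)[j]'(by simp [tbl_length, hj]) = if j < k then cnt (cs.take (j + 1)) else 0 := by
  simp [tbl]

lemma take_snoc (cs : List Char) (k : Nat) (h : k < cs.length) :
    cs.take (k + 1) = cs.take k ++ [cs[k]] := by
  rw [List.take_add_one, List.getElem?_eq_getElem h]
  rfl

lemma set_tbl (cs : List Char) (k : Nat) (_ : k < cs.length) :
    (tbl cs k).set k (cnt (cs.take (k + 1))) = tbl cs (k + 1) := by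
  apply List.ext_getElem
  · simp [tbl_length]
  · intro j h1 h2
    rw [List.getElem_set]
    have hj : j < cs.length := by simpa [tbl_length] using h2
    rw [tbl_get cs k j hj, tbl_get cs (k+1) j hj]
    by_cases hjk : k = j
    · simp [hjk]
    · split_ifs with p q q <;> first | rfl | omega

lemma read_prev (cs : List Char) (k : Nat) (hk : k < cs.length) :
    PySem.List.pyGetD (tbl cs k) ((k : Int) - 1) 0 = cnt (cs.take k) := by
  rcases Nat.eq_zero_or_pos k with h0 | hpos
  · subst h0
    have hn : 0 < (tbl cs 0).length := by rw [tbl_length]; omega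
    rw [show ((0:Nat) : Int) - 1 = (-1 : Int) from rfl]
    unfold PySem.List.pyGetD
    rw [pyGet_neg_one _ hn, Option.getD_some]
    simp [tbl, cnt, cntRev]
  · rw [show (k : Int) - 1 = (((k - 1 : Nat) : Nat) : Int) by omega, PySem.List.pyGetD_natCast]
    have hlt : k - 1 < (tbl cs k).length := by
      rw [tbl_length]
      omega
    rw [List.getD_eq_getElem _ _ hlt, tbl_get cs k (k-1) (by omega)]
    rw [if_pos (by omega), show k - 1 + 1 = k by omega]

lemma step_tbl (cs : List Char) (k : Nat) (hk : k < cs.length) :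
    validStep cs (tbl cs k) (k : Int) = tbl cs (k + 1) := by
  have hs : PySem.List.slice cs none (some (k : Int)) = cs.take k :=
    PySem.List.slice_to cs (by exact_mod_cast Int.natCast_nonneg k)
  have hlen : ((cs.take k).length : Int) = (k : Int) := by
    simp [List.length_take, Nat.min_eq_left (Nat.le_of_lt hk)]
  have hc : PySem.List.pyGetD cs (k : Int) ' ' = cs[k] := by
    rw [PySem.List.pyGetD_natCast, List.getD_eq_getElem _ _ hk]
  have hprev := read_prev cs k hk
  have hts := take_snoc cs k hk
  have hcs : cnt (cs.take (k + 1)) = cnt (cs.take k) + lastAZ (cs.take (k + 1)) + 1 := by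
    rw [hts]; exact cnt_snoc _ _
  have hla : lastAZ (cs.take (k + 1)) =
      if cs[k] = 'a' ∨ cs[k] = 'z' then (k : Int) else lastAZ (cs.take k) := by
    rw [hts, lastAZ_snoc]
    split
    · exact_mod_cast hlen
    · rfl
  unfold validStep
  simp only [hs, hlen, hc, hprev]
  by_cases haz : cs[k] = 'a' ∨ cs[k] = 'z'
  · by_cases h0 : k = 0
    · rw [if_pos (by exact ⟨by exact_mod_cast congrArg Nat.cast h0, haz⟩)]
      subst h0
      rw [show ((0:Nat):Int).toNat = 0 from rfl]
      have : cnt (cs.take 1) = 1 := by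
        rw [hcs, hla, if_pos haz]; simp [cnt, cntRev]
      rw [← this]
      exact set_tbl cs 0 hk
    · rw [if_neg (by intro hcon; exact h0 (by exact_mod_cast hcon.1)), if_pos haz]
      rw [Int.toNat_natCast]
      have : (k : Int) + cnt (cs.take k) + 1 = cnt (cs.take (k + 1)) := by
        rw [hcs, hla, if_pos haz]; ring
      rw [this]
      exact set_tbl cs k hk
  · rw [if_neg (by intro hcon; exact haz hcon.2), if_neg haz, Int.toNat_natCast]
    by_cases h0 : cnt (cs.take k) = 0
    · rw [if_pos h0]
      have hlz : lastAZ (cs.take k) = -1 :=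
        (cntRev_nonneg_zero (cs.take k).reverse).2 h0
      have hone : cnt (cs.take (k + 1)) = 0 := by
        rw [hcs, hla, if_neg haz, hlz, h0]; ring
      have hv : cnt (cs.take k) = cnt (cs.take (k + 1)) := by omega
      rw [hv]
      exact set_tbl cs k hk
    · rw [if_neg h0]
      have hql : (((cs.take k).reverse).length : Int) = (k : Int) := by
        rw [List.length_reverse]; exact hlen
      have hia := index_revLastC (cs.take k).reverse 'a'
      have hiz := index_revLastC (cs.take k).reverse 'z'
      rw [hql] at hia hiz
      rw [hia, hiz]
      have hmax := revLast_eq_max (cs.take k).reverse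
      have hval : ∀ v : Int, v = cnt (cs.take (k + 1)) →
          (tbl cs k).set k v = tbl cs (k + 1) := by
        intro v hv; rw [hv]; exact set_tbl cs k hk
      have htgt : cnt (cs.take k) + lastAZ (cs.take k) + 1 = cnt (cs.take (k + 1)) := by
        rw [hcs, hla, if_neg haz]
      split
      · next hgt =>
        apply hval
        rw [← htgt]
        have : revLastC (cs.take k).reverse 'a' = lastAZ (cs.take k) := by
          unfold lastAZ; omega
        rw [this]
      · next hle =>
        apply hval
        rw [← htgt]
        have : revLastC (cs.take k).reverse 'z' = lastAZ (cs.take k) := by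
          unfold lastAZ; omega
        rw [this]

lemma fold_tbl (cs : List Char) (k : Nat) (hk : k ≤ cs.length) :
    (List.range k).foldl (fun sl (j : Nat) => validStep cs sl (j : Int)) (tbl cs 0)
      = tbl cs k := by
  induction k with
  | zero => rfl
  | succ m ih =>
    rw [List.range_succ, List.foldl_append, ih (by omega), List.foldl_cons, List.foldl_nil]
    exact step_tbl cs m (by omega)

lemma a_eq_cnt (str1 : String) (h : str1.toList ≠ []) :
    valid_sudstr str1 = cnt str1.toList := by
  unfold valid_sudstr
  set cs := str1.toList with hcs
  have hinit : (PySem.List.pyRange 0 (cs.length : Int) 1).map (fun _ => (0 : Int)) = tbl cs 0 := by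
    rw [PySem.List.pyRange_zero_natCast, List.map_map]
    unfold tbl
    exact List.map_congr_left (fun x _ => by simp)
  have hfold : (PySem.List.pyRange 0 (cs.length : Int) 1).foldl (validStep cs) (tbl cs 0)
      = tbl cs cs.length := by
    rw [PySem.List.pyRange_zero_natCast, List.foldl_map]
    exact fold_tbl cs cs.length le_rfl
  simp only [hinit, hfold]
  have hn : 0 < (tbl cs cs.length).length := by
    rw [tbl_length]; exact List.length_pos_iff.mpr h
  rw [pyGet_neg_one _ hn, Option.getD_some]
  have hn' : 0 < cs.length := List.length_pos_iff.mpr h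
  simp only [tbl_length]
  rw [tbl_get cs cs.length (cs.length - 1) (by omega), if_pos (by omega)]
  congr 1
  rw [show cs.length - 1 + 1 = cs.length by omega, List.take_length]

-- ===== VERDICT (by name: the statement is the Claim_ definition above) =====
theorem valid_sudstr_spec : Claim_equal_valid_sudstr := by
  intro str1 _ hpre
  unfold Spec_valid_sudstr
  have h : str1.toList ≠ [] := fun hc => hpre (String.toList_eq_nil_iff.mp hc)
  rw [a_eq_cnt str1 h, alt_eq_cnt str1]
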